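-- pv_equiv track=rewrite | github.com/UGLimusic/mes_cours_2021 | NSI2/016-CH14-Arbres binaires/Exercices/Scripts/perfect_tree_list.py | list_edge
-- ===== SOURCE A (Python) =====
-- def left(i):
--     return 2 * i
--
-- def list_edge(pt, i=1):
--     result = []
--     if left(2 * i) < len(pt):
--         result.append((i, 2 * i))
--         result.extend(list_edge(pt, 2 * i))
--     if left(2 * i + 1) < len(pt):
--         result.append((i, 2 * i + 1))
--         result.extend(list_edge(pt, 2 * i + 1))
--     return result
-- ===== SOURCE B (Python) =====
-- def list_edge(pt, i=1):
--     result = []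
--     stack = [(None, i)]
--     n = len(pt)
--     while stack:
--         parent, node = stack.pop()
--         if parent is not None:
--             result.append((parent, node))
--         if 2 * (2 * node + 1) < n:
--             stack.append((node, 2 * node + 1))
--         if 2 * (2 * node) < n:
--             stack.append((node, 2 * node))
--     return result
-- ===== Notes on version B (the rewrite author's own statement) =====
-- stated objective: alternative
-- what changed: Replaces A's recursion with an iterative preorder DFS over an explicit stack of (parent, child) pairs that pushes the right child before the left, accumulating edges in one loop.
import Mathlib
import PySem

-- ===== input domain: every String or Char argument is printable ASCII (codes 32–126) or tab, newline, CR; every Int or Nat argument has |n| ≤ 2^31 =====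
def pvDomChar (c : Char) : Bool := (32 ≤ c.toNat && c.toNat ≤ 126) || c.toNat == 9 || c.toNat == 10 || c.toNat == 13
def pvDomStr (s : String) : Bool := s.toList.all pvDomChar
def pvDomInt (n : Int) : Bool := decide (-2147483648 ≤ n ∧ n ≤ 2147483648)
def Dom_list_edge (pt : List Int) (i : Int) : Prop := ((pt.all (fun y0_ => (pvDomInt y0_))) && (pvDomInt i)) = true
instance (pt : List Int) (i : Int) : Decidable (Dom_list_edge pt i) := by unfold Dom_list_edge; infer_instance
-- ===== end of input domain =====

-- B replaces A's recursion by an iterative DFS over an explicit stack of (parent, child)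
-- pairs (objective: alternative decomposition, same cost); return value equivalence only.

-- ===== PORT A =====
-- Python's recursion has no structural measure (it diverges for i ≤ 0), so the port
-- carries a fuel counter; fuel pt.length + 1 is proved sufficient on Pre_ below.
def leftA (i : Int) : Int := 2 * i

def listEdgeFuel : Nat → List Int → Int → List (Int × Int)
  | 0, _, _ => []
  | f+1, pt, i =>
    (if leftA (2 * i) < (pt.length : Int) then (i, 2 * i) :: listEdgeFuel f pt (2 * i) else [])
      ++
    (if leftA (2 * i + 1) < (pt.length : Int) then (i, 2 * i + 1) :: listEdgeFuel f pt (2 * i + 1) else [])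

def list_edge (pt : List Int) (i : Int) : List (Int × Int) := listEdgeFuel (pt.length + 1) pt i

-- ===== PORT B =====
-- The while loop becomes fuel recursion on the stack; fuel 2^(pt.length+2) is proved sufficient on Pre_.
def loopB : Nat → List Int → List (Option Int × Int) → List (Int × Int) → List (Int × Int)
  | 0, _, _, result => result
  | _+1, _, [], result => result
  | f+1, pt, (parent, node) :: stack, result =>
    let result' := match parent with
      | some p => result ++ [(p, node)]
      | none => result
    let st1 := if 2 * (2 * node + 1) < (pt.length : Int) then (some node, 2 * node + 1) :: stack else stack
    let st2 := if 2 * (2 * node) < (pt.length : Int) then (some node, 2 * node) :: st1 else st1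
    loopB f pt st2 result'

def list_edge_alt (pt : List Int) (i : Int) : List (Int × Int) :=
  loopB (2 ^ (pt.length + 2)) pt [(none, i)] []

-- ===== PRECONDITION & SPEC =====
-- Pre_ excludes exactly the inputs where Python A (and B) hit infinite recursion
-- (RecursionError): i ≤ 0 with pt nonempty, and i < 0 with pt empty.
def Pre_list_edge (pt : List Int) (i : Int) : Prop := 1 ≤ i ∨ (i = 0 ∧ pt = [])
instance (pt : List Int) (i : Int) : Decidable (Pre_list_edge pt i) := by unfold Pre_list_edge; infer_instance
def pvWitness_list_edge : List Int × Int := ([5, 3, 8, 1, 4, 7, 9], 1)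

def Spec_list_edge (pt : List Int) (i : Int) (out : List (Int × Int)) : Prop := out = list_edge_alt pt i
instance (pt : List Int) (i : Int) (out : List (Int × Int)) : Decidable (Spec_list_edge pt i out) := by unfold Spec_list_edge; infer_instance

-- ===== CLAIM (what is proved, stated in full; the proofs are below) =====
def Claim_equal_list_edge : Prop := ∀ (pt : List Int) (i : Int), Dom_list_edge pt i → Pre_list_edge pt i → Spec_list_edge pt i (list_edge pt i)

-- ===== LEMMAS AND PROOFS =====

-- Fuel irrelevance for A's recursion: any fuel ≥ pt.length - i.toNat gives the same result (i ≥ 1).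
theorem listEdgeFuel_irrel (pt : List Int) :
    ∀ f g i, 1 ≤ i → pt.length ≤ i.toNat + f → pt.length ≤ i.toNat + g →
      listEdgeFuel f pt i = listEdgeFuel g pt i := by
  intro f
  induction f with
  | zero =>
    intro g i hi hf hg
    have hlen : (pt.length : Int) ≤ i := by omega
    have h1 : ¬ (leftA (2 * i) < (pt.length : Int)) := by simp only [leftA]; omega
    have h2 : ¬ (leftA (2 * i + 1) < (pt.length : Int)) := by simp only [leftA]; omega
    cases g with
    | zero => rfl
    | succ g' => simp [listEdgeFuel, h1, h2]
  | succ f' ih =>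
    intro g i hi hf hg
    cases g with
    | zero =>
      have hlen : (pt.length : Int) ≤ i := by omega
      have h1 : ¬ (leftA (2 * i) < (pt.length : Int)) := by simp only [leftA]; omega
      have h2 : ¬ (leftA (2 * i + 1) < (pt.length : Int)) := by simp only [leftA]; omega
      simp [listEdgeFuel, h1, h2]
    | succ g' =>
      have hL : 1 ≤ 2 * i := by omega
      have hR : 1 ≤ 2 * i + 1 := by omega
      have e1 : listEdgeFuel f' pt (2 * i) = listEdgeFuel g' pt (2 * i) :=
        ih g' (2 * i) hL (by omega) (by omega)
      have e2 : listEdgeFuel f' pt (2 * i + 1) = listEdgeFuel g' pt (2 * i + 1) :=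
        ih g' (2 * i + 1) hR (by omega) (by omega)
      simp only [listEdgeFuel, e1, e2]

-- One-step unfolding of list_edge in terms of itself (for i ≥ 1).
theorem list_edge_unfold (pt : List Int) (i : Int) (hi : 1 ≤ i) :
    list_edge pt i =
      (if leftA (2 * i) < (pt.length : Int) then (i, 2 * i) :: list_edge pt (2 * i) else [])
        ++
      (if leftA (2 * i + 1) < (pt.length : Int) then (i, 2 * i + 1) :: list_edge pt (2 * i + 1) else []) := by
  have e1 : listEdgeFuel pt.length pt (2 * i) = list_edge pt (2 * i) :=
    listEdgeFuel_irrel pt pt.length (pt.length + 1) (2 * i) (by omega) (by omega) (by omega)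
  have e2 : listEdgeFuel pt.length pt (2 * i + 1) = list_edge pt (2 * i + 1) :=
    listEdgeFuel_irrel pt pt.length (pt.length + 1) (2 * i + 1) (by omega) (by omega) (by omega)
  show listEdgeFuel (pt.length + 1) pt i = _
  simp only [listEdgeFuel, e1, e2]

-- Size bound: |listEdgeFuel f pt i| + 2 ≤ 2^(f+1).
theorem listEdgeFuel_len (pt : List Int) : ∀ f i, (listEdgeFuel f pt i).length + 2 ≤ 2 ^ (f + 1) := by
  intro f
  induction f with
  | zero => intro i; simp [listEdgeFuel]
  | succ f' ih =>
    intro i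
    have h1 := ih (2 * i)
    have h2 := ih (2 * i + 1)
    have hp : 2 ^ (f' + 1 + 1) = 2 ^ (f' + 1) + 2 ^ (f' + 1) := by ring
    simp only [listEdgeFuel, List.length_append]
    split_ifs <;> simp only [List.length_cons, List.length_nil] <;> omega

-- The loop-fuel actually needed for a stack.
def neededB (pt : List Int) (st : List (Option Int × Int)) : Nat :=
  (st.map (fun e => 1 + (list_edge pt e.2).length)).sum

def emitB (e : Option Int × Int) : List (Int × Int) :=
  match e.1 with
  | some p => [(p, e.2)]
  | none => []

-- Loop invariant: with enough fuel, the loop appends, per stack entry, its edge (if any)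
-- followed by A's edge list of its subtree.
theorem loopB_spec (pt : List Int) :
    ∀ f st res, (∀ e ∈ st, 1 ≤ e.2) → neededB pt st ≤ f →
      loopB f pt st res = res ++ (st.map (fun e => emitB e ++ list_edge pt e.2)).flatten := by
  intro f
  induction f with
  | zero =>
    intro st res hinv hn
    cases st with
    | nil => simp [loopB]
    | cons e st' => simp [neededB] at hn
  | succ f' ih =>
    intro st res hinv hn
    cases st with
    | nil => simp [loopB]
    | cons e st' =>
      obtain ⟨p, n⟩ := e
      have hn1 : 1 ≤ n := hinv (p, n) List.mem_cons_self
      have hunf := list_edge_unfold pt n hn1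
      simp only [leftA] at hunf
      have hrest : ∀ e ∈ st', 1 ≤ e.2 := fun e he => hinv e (List.mem_cons_of_mem _ he)
      simp only [loopB]
      by_cases hgl : 2 * (2 * n) < (pt.length : Int)
      · by_cases hgr : 2 * (2 * n + 1) < (pt.length : Int)
        · rw [if_pos hgr, if_pos hgl]
          rw [if_pos hgl, if_pos hgr] at hunf
          have hlen : (list_edge pt n).length =
              (1 + (list_edge pt (2 * n)).length) + (1 + (list_edge pt (2 * n + 1)).length) := by
            rw [hunf]; simp; omega
          rw [ih ((some n, 2 * n) :: (some n, 2 * n + 1) :: st') _ ?_ ?_]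
          · cases p <;> simp [emitB, hunf]
          · intro e he
            simp only [List.mem_cons] at he
            rcases he with rfl | rfl | h
            · simp; omega
            · simp; omega
            · exact hrest _ h
          · simp only [neededB, List.map_cons, List.sum_cons] at hn ⊢
            omega
        · rw [if_neg hgr, if_pos hgl]
          rw [if_pos hgl, if_neg hgr] at hunf
          have hlen : (list_edge pt n).length = 1 + (list_edge pt (2 * n)).length := by
            rw [hunf]; simp; omega
          rw [ih ((some n, 2 * n) :: st') _ ?_ ?_]
          · cases p <;> simp [emitB, hunf]
          · intro e he
            simp only [List.mem_cons] at he
            rcases he with rfl | h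
            · simp; omega
            · exact hrest _ h
          · simp only [neededB, List.map_cons, List.sum_cons] at hn ⊢
            omega
      · by_cases hgr : 2 * (2 * n + 1) < (pt.length : Int)
        · rw [if_pos hgr, if_neg hgl]
          rw [if_neg hgl, if_pos hgr] at hunf
          have hlen : (list_edge pt n).length = 1 + (list_edge pt (2 * n + 1)).length := by
            rw [hunf]; simp; omega
          rw [ih ((some n, 2 * n + 1) :: st') _ ?_ ?_]
          · cases p <;> simp [emitB, hunf]
          · intro e he
            simp only [List.mem_cons] at he
            rcases he with rfl | h
            · simp; omega
            · exact hrest _ h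
          · simp only [neededB, List.map_cons, List.sum_cons] at hn ⊢
            omega
        · rw [if_neg hgr, if_neg hgl]
          rw [if_neg hgl, if_neg hgr] at hunf
          have hlen : (list_edge pt n).length = 0 := by rw [hunf]; simp
          rw [ih st' _ hrest ?_]
          · cases p <;> simp [emitB, hunf]
          · simp only [neededB, List.map_cons, List.sum_cons] at hn ⊢
            omega

-- ===== VERDICT (by name: the statement is the Claim_ definition above) =====
theorem list_edge_spec : Claim_equal_list_edge := by
  intro pt i _ hpre
  unfold Spec_list_edge
  rcases hpre with hi | ⟨hi, hpt⟩
  · have hneed : neededB pt [(none, i)] ≤ 2 ^ (pt.length + 2) := by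
      have h := listEdgeFuel_len pt (pt.length + 1) i
      have he : pt.length + 1 + 1 = pt.length + 2 := rfl
      rw [he] at h
      simp only [neededB, List.map_cons, List.map_nil, List.sum_cons, List.sum_nil]
      unfold list_edge
      omega
    have := loopB_spec pt (2 ^ (pt.length + 2)) [(none, i)] []
      (by intro e he; simp at he; subst he; exact hi) hneed
    unfold list_edge_alt
    rw [this]
    simp [emitB]
  · subst hi; subst hpt
    decide
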